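-- pv_equiv track=rewrite | github.com/huangysh/RuST_DM | Python_file/functions.py | path_simplification
-- ===== SOURCE A (Python) =====
-- def path_simplification(path, sewer_nodes):
--     """
--     污水接入已有管网目标节点时，新生成的管网可能与已有管网重叠，或形成环路。为避免此类情况发生，需对新生成路径进行检测，当路径中节点为已有管网节点时，
--     该点之后的路径将被删除。
--
--     :param path: list, [start, id1, id2, ..., end]
--     :param sewer_nodes: id list. id of sewer nodes.
--
--     :return:
--     path_new: list, [start, id1, id2, ..., end_new]
--     """
--     path_new = []
--     for node in path:
--         if node not in sewer_nodes:
--             path_new.append(node)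
--         else:
--             path_new.append(node)
--             break
--     return path_new
-- ===== SOURCE B (Python) =====
-- def path_simplification(path, sewer_nodes):
--     idx = next((i for i, n in enumerate(path) if n in sewer_nodes), None)
--     if idx is None:
--         return path[:]
--     return path[:idx + 1]
-- ===== Notes on version B (the rewrite author's own statement) =====
-- stated objective: simpler
-- what changed: Replaces the accumulate-and-break loop with find-first-boundary-then-slice: locate the index of the first node in sewer_nodes and return a single slice path[:idx+1] (or a full copy when none).
import Mathlib
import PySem

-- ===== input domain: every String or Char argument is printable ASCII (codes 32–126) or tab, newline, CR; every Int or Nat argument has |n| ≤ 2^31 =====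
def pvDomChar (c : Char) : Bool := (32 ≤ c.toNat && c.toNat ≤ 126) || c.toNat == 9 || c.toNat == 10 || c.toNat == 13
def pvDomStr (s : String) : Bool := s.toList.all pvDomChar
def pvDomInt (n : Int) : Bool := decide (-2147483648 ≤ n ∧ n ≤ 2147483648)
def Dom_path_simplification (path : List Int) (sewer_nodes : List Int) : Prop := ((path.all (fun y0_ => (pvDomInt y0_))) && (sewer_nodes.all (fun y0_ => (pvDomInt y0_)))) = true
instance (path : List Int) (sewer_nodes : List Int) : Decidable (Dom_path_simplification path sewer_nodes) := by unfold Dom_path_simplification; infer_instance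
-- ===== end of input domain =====

-- B truncates the path by finding the first sewer node and taking one slice, instead of A's append-and-break loop.

-- ===== PORT A =====
-- A's loop appends each node, breaking right after appending the first node found in sewer_nodes;
-- the break is rendered as stopping the structural recursion.
def path_simplification (path : List Int) (sewer_nodes : List Int) : List Int :=
  match path with
  | [] => []
  | node :: rest =>
      if node ∈ sewer_nodes then [node]
      else node :: path_simplification rest sewer_nodes

-- ===== PORT B =====
-- Source B: idx = first index whose node is in sewer_nodes; none → full copy, some i → path[:i+1].
def path_simplification_alt (path : List Int) (sewer_nodes : List Int) : List Int :=
  match path.findIdx? (fun n => decide (n ∈ sewer_nodes)) with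
  | none => path
  | some i => path.take (i + 1)

-- ===== PRECONDITION & SPEC =====
def Spec_path_simplification (path : List Int) (sewer_nodes : List Int) (out : List Int) : Prop := out = path_simplification_alt path sewer_nodes
instance (path : List Int) (sewer_nodes : List Int) (out : List Int) : Decidable (Spec_path_simplification path sewer_nodes out) := by unfold Spec_path_simplification; infer_instance

-- ===== CLAIM (what is proved, stated in full; the proofs are below) =====
def Claim_equal_path_simplification : Prop := ∀ (path : List Int) (sewer_nodes : List Int), Dom_path_simplification path sewer_nodes → Spec_path_simplification path sewer_nodes (path_simplification path sewer_nodes)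

-- ===== LEMMAS AND PROOFS =====
theorem path_simplification_eq_alt (path : List Int) (sewer_nodes : List Int) :
    path_simplification path sewer_nodes = path_simplification_alt path sewer_nodes := by
  induction path with
  | nil => rfl
  | cons node rest ih =>
      by_cases h : node ∈ sewer_nodes
      · simp [path_simplification, path_simplification_alt, List.findIdx?_cons, h]
      · cases hf : List.findIdx? (fun n => decide (n ∈ sewer_nodes)) rest with
        | none =>
            simp [path_simplification, path_simplification_alt, List.findIdx?_cons, h, hf]
            simpa [path_simplification_alt, hf] using ih
        | some i =>
            simp [path_simplification, path_simplification_alt, List.findIdx?_cons, h, hf,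
              List.take_succ_cons]
            simpa [path_simplification_alt, hf] using ih

-- ===== VERDICT (by name: the statement is the Claim_ definition above) =====
theorem path_simplification_spec : Claim_equal_path_simplification := by
  intro path sewer_nodes _
  unfold Spec_path_simplification
  exact path_simplification_eq_alt path sewer_nodes
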